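-- pv_equiv track=rewrite | github.com/fabricioguidine/api-param-coverage | src/modules/scenario_generator/coverage_logic.py | greedy_min_cover
-- ===== SOURCE A (Python) =====
-- def greedy_min_cover(param_matrix: dict) -> list[dict]:
--     """
--     Given:
--         {
--           "header.Authorization": ["Bearer VALID", "Bearer EXPIRED"],
--           "body.currency": ["USD", "BRL"],
--         }
--
--     Build a compact set of representative combos.
--
--     Strategy: index-zip. For each index i, take the i-th element
--     from each param list, falling back to the last if needed.
--     """
--     keys = list(param_matrix.keys())
--     lists_ = [param_matrix[k] for k in keys]
--     if not lists_:
--         return []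
--
--     max_len = max(len(vs) for vs in lists_)
--     combos = []
--     for i in range(max_len):
--         row = {}
--         for k, vs in zip(keys, lists_):
--             idx = i if i < len(vs) else len(vs) - 1
--             row[k] = vs[idx]
--         combos.append(row)
--     return combos
-- ===== SOURCE B (Python) =====
-- def greedy_min_cover(param_matrix: dict) -> list[dict]:
--     # Pad each column to max_len by repeating its last element, then transpose.
--     if not param_matrix:
--         return []
--     keys = list(param_matrix)
--     cols = list(param_matrix.values())
--     max_len = max(len(vs) for vs in cols)
--     padded = [vs + [vs[-1]] * (max_len - len(vs)) if len(vs) < max_len else list(vs)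
--               for vs in cols]
--     return [dict(zip(keys, row)) for row in zip(*padded)]
-- ===== Notes on version B (the rewrite author's own statement) =====
-- stated objective: alternative
-- what changed: Replaces A's row-by-row loop with a clamped index per cell by a column-major pass that pads each value list to max_len with its last element and then transposes with zip(*) to assemble the rows.
import Mathlib
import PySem

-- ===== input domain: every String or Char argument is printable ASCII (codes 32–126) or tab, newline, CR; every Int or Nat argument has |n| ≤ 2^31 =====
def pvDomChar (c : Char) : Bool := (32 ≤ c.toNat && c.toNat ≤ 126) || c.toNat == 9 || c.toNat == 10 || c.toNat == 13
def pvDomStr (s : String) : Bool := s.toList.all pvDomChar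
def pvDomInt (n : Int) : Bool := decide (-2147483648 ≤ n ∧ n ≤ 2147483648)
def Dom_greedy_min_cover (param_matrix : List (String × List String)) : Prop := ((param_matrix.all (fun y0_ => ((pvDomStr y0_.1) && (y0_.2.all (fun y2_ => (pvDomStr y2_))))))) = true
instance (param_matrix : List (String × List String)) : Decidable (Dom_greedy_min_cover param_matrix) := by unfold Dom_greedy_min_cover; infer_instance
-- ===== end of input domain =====

-- B replaces A's row-by-row index-clamping loop by a column-major pad pass followed by a
-- zip(*)-style transpose; same cost, different decomposition (objective: alternative).

-- ===== PORT A =====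
def greedy_min_cover (param_matrix : List (String × List String)) : List (List (String × String)) :=
  let keys := param_matrix.map Prod.fst
  let lists_ := param_matrix.map Prod.snd
  if lists_.isEmpty then [] else
  let max_len : Int := (PySem.List.max? (lists_.map (fun vs => PySem.List.len vs)) id).getD 0
  (PySem.List.pyRange 0 max_len 1).foldl (fun combos i =>
    let row := (keys.zip lists_).foldl (fun row kv =>
      let idx : Int := if i < PySem.List.len kv.2 then i else PySem.List.len kv.2 - 1
      row.insert kv.1 (PySem.List.pyGetD kv.2 idx "")) PySem.Dict.empty
    combos ++ [row.items]) []

-- ===== PORT B =====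
-- termination helpers for zipStar (cited in its decreasing_by)
theorem pvSumTailLe (ls : List (List String)) :
    ((ls.map List.tail).map List.length).sum ≤ (ls.map List.length).sum := by
  induction ls with
  | nil => simp
  | cons a t ih =>
    simp only [List.map_cons, List.sum_cons]
    have : a.tail.length ≤ a.length := by cases a <;> simp
    omega

theorem pvSumTailLt (ls : List (List String)) (hne : ls ≠ [])
    (h : ∀ l ∈ ls, l ≠ []) :
    ((ls.map List.tail).map List.length).sum < (ls.map List.length).sum := by
  cases ls with
  | nil => exact absurd rfl hne
  | cons a t =>
    simp only [List.map_cons, List.sum_cons]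
    have ha : a ≠ [] := h a (List.mem_cons_self)
    have h1 : a.tail.length < a.length := by
      cases a with
      | nil => exact absurd rfl ha
      | cons x xs => simp
    have h2 := pvSumTailLe t
    omega

-- transliteration of Python's zip(*cols) on a list of columns
def zipStar (ls : List (List String)) : List (List String) :=
  if h : ls = [] ∨ ls.any (fun l => l.isEmpty) then []
  else
    (ls.map (fun l => l.headD "")) :: zipStar (ls.map List.tail)
termination_by ((ls.map List.length).sum)
decreasing_by
  rw [not_or] at h
  have h2 := h.2
  simp only [List.any_eq_true, not_exists, not_and] at h2
  have := pvSumTailLt ls h.1 (fun l hl => by simpa [List.isEmpty_iff] using h2 l hl)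
  simpa using this

def greedy_min_cover_alt (param_matrix : List (String × List String)) : List (List (String × String)) :=
  if param_matrix.isEmpty then [] else
  let keys := param_matrix.map Prod.fst
  let cols := param_matrix.map Prod.snd
  let max_len : Int := (PySem.List.max? (cols.map (fun vs => PySem.List.len vs)) id).getD 0
  let padded := cols.map (fun vs =>
    if PySem.List.len vs < max_len then
      vs ++ List.replicate (max_len - PySem.List.len vs).toNat (PySem.List.pyGetD vs (-1) "")
    else vs)
  (zipStar padded).map (fun row => (PySem.Dict.ofList (keys.zip row)).items)

-- ===== PRECONDITION & SPEC =====
-- Pre_ excludes exactly the inputs where the Python A raises IndexError (vs[-1] on an empty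
-- value list while some other value list is nonempty); B raises there too.
def Pre_greedy_min_cover (param_matrix : List (String × List String)) : Prop :=
  (∀ p ∈ param_matrix, p.2 ≠ []) ∨ (∀ p ∈ param_matrix, p.2 = [])
instance (param_matrix : List (String × List String)) : Decidable (Pre_greedy_min_cover param_matrix) := by unfold Pre_greedy_min_cover; infer_instance

def pvWitness_greedy_min_cover : (List (String × List String)) :=
  [("header.Authorization", ["Bearer VALID", "Bearer EXPIRED"]), ("body.currency", ["USD"])]

def Spec_greedy_min_cover (param_matrix : List (String × List String)) (out : List (List (String × String))) : Prop := out = greedy_min_cover_alt param_matrix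
instance (param_matrix : List (String × List String)) (out : List (List (String × String))) : Decidable (Spec_greedy_min_cover param_matrix out) := by unfold Spec_greedy_min_cover; infer_instance

-- ===== CLAIM (what is proved, stated in full; the proofs are below) =====
def Claim_equal_greedy_min_cover : Prop := ∀ (param_matrix : List (String × List String)), Dom_greedy_min_cover param_matrix → Pre_greedy_min_cover param_matrix → Spec_greedy_min_cover param_matrix (greedy_min_cover param_matrix)

-- ===== LEMMAS AND PROOFS =====

theorem zipStar_eq (n : Nat) (ls : List (List String)) (hne : ls ≠ [])
    (h : ∀ l ∈ ls, l.length = n) :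
    zipStar ls = (List.range n).map (fun i => ls.map (fun l => l.getD i "")) := by
  induction n generalizing ls with
  | zero =>
    obtain ⟨a, ha⟩ := List.exists_mem_of_ne_nil ls hne
    rw [zipStar.eq_def]
    rw [dif_pos]
    · simp
    · right
      refine List.any_eq_true.mpr ⟨a, ha, ?_⟩
      have := h a ha
      simpa [List.isEmpty_iff, List.length_eq_zero_iff] using this
  | succ n ih =>
    have hnonempty : ∀ l ∈ ls, l ≠ [] := by
      intro l hl hcon
      have := h l hl
      simp [hcon] at this
    rw [zipStar.eq_def]
    rw [dif_neg]
    · have htne : ls.map List.tail ≠ [] := by simpa using hne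
      have htlen : ∀ l ∈ ls.map List.tail, l.length = n := by
        intro l hl
        obtain ⟨l0, hl0, rfl⟩ := List.mem_map.mp hl
        have := h l0 hl0
        cases l0 with
        | nil => simp at this
        | cons x xs => simpa using this
      rw [ih (ls.map List.tail) htne htlen]
      rw [List.range_succ_eq_map]
      simp only [List.map_cons, List.map_map]
      refine congrArg₂ List.cons ?_ ?_
      · apply List.map_congr_left
        intro l _
        cases l <;> rfl
      · apply List.map_congr_left
        intro i _
        apply List.map_congr_left
        intro l hl
        have := hnonempty l hl
        cases l with
        | nil => exact absurd rfl this
        | cons x xs => simp [List.getD]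
    · rw [not_or]
      refine ⟨hne, ?_⟩
      simp only [List.any_eq_true, not_exists, not_and]
      intro l hl
      simp only [List.isEmpty_iff]
      exact hnonempty l hl

-- the value A's clamped index picks equals the value in B's padded column
theorem padded_getD (vs : List String) (hvs : vs ≠ []) (n i : Nat)
    (_hlen : vs.length ≤ n) (hi : i < n) :
    PySem.List.pyGetD vs
        (if (i : Int) < PySem.List.len vs then (i : Int) else PySem.List.len vs - 1) "" =
      (if PySem.List.len vs < (n : Int) then
          vs ++ List.replicate (((n : Int) - PySem.List.len vs).toNat) (PySem.List.pyGetD vs (-1) "")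
        else vs).getD i "" := by
  simp only [PySem.List.len_eq]
  by_cases hcase : i < vs.length
  · rw [if_pos (by exact_mod_cast hcase)]
    by_cases hpad : (vs.length : Int) < (n : Int)
    · rw [if_pos hpad]
      simp [List.getD, List.getElem?_append_left hcase, hcase]
    · rw [if_neg hpad]
      simp [List.getD, hcase]
  · -- i ≥ length: clamp to last element; padded list repeats the last element
    have hge : vs.length ≤ i := Nat.le_of_not_lt hcase
    have hlt : vs.length < n := Nat.lt_of_le_of_lt hge hi
    have hpos : 0 < vs.length := List.length_pos_of_ne_nil hvs
    rw [if_neg (by exact_mod_cast hcase), if_pos (by exact_mod_cast hlt)]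
    have hlast : PySem.List.pyGetD vs (-1) "" = vs.getLast hvs := PySem.List.pyGetD_neg_one vs "" hvs
    have hidx : ((vs.length : Int) - 1) = ((vs.length - 1 : Nat) : Int) := by omega
    rw [hidx, PySem.List.pyGetD_natCast]
    have hrep : ((n : Int) - (vs.length : Int)).toNat = n - vs.length := by omega
    rw [hrep]
    simp only [List.getD]
    rw [List.getElem?_append_right hge, List.getElem?_replicate]
    have hlt2 : i - vs.length < n - vs.length := by omega
    rw [if_pos hlt2]
    rw [hlast, List.getLast_eq_getElem]
    have h1 : vs.length - 1 < vs.length := Nat.sub_lt hpos Nat.one_pos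
    simp [List.getElem?_eq_getElem h1]

-- A's per-row dict fold is Dict.ofList of the zipped pair list
theorem rowfold_eq_ofList (l : List (String × List String)) (v : String × List String → String) :
    l.foldl (fun (row : PySem.Dict String String) kv => row.insert kv.1 (v kv)) PySem.Dict.empty
      = PySem.Dict.ofList (l.map (fun kv => (kv.1, v kv))) := by
  rw [PySem.Dict.ofList, PySem.Dict.update, List.foldl_map]

-- ===== VERDICT (by name: the statement is the Claim_ definition above) =====
theorem greedy_min_cover_spec : Claim_equal_greedy_min_cover := by
  intro pm _ hpre
  unfold Spec_greedy_min_cover greedy_min_cover greedy_min_cover_alt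
  by_cases hpm : pm = []
  · subst hpm; rfl
  · simp only [List.isEmpty_iff, List.map_eq_nil_iff, hpm, if_false]
    -- the shared max_len
    obtain ⟨m, hm⟩ : ∃ m, PySem.List.max? ((pm.map Prod.snd).map (fun vs => PySem.List.len vs)) id = some m := by
      cases h : PySem.List.max? ((pm.map Prod.snd).map (fun vs => PySem.List.len vs)) id with
      | none =>
        rw [PySem.List.max?_eq_none_iff] at h
        simp [hpm] at h
      | some m => exact ⟨m, rfl⟩
    rw [hm]
    simp only [Option.getD_some]
    have hmax : ∀ p ∈ pm, (p.2.length : Int) ≤ m := by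
      intro p hp
      have hmem : PySem.List.len p.2 ∈ (pm.map Prod.snd).map (fun vs => PySem.List.len vs) :=
        List.mem_map.mpr ⟨p.2, List.mem_map.mpr ⟨p, hp, rfl⟩, rfl⟩
      simpa [PySem.List.len_eq] using PySem.List.max?_isMax hm _ hmem
    obtain ⟨q, hq, hqm⟩ : ∃ q ∈ pm, m = (q.2.length : Int) := by
      have := PySem.List.max?_mem hm
      simp only [List.mem_map] at this
      obtain ⟨vs, ⟨p, hp, rfl⟩, rfl⟩ := this
      exact ⟨p, hp, by simp [PySem.List.len_eq]⟩
    have hm0 : 0 ≤ m := by omega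
    rcases hpre with hpre | hpre
    · -- every value list is nonempty
      have hmn : m = ((m.toNat : Nat) : Int) := by omega
      rw [hmn]
      rw [PySem.List.pyRange_zero_natCast, List.foldl_map]
      simp only [PySem.List.foldl_append_singleton_eq_map, List.nil_append]
      simp only [List.zip_map', Prod.mk.eta, List.map_id]
      simp only [rowfold_eq_ofList]
      -- B side: every padded column has length m.toNat
      have hlens : ∀ l ∈ (pm.map Prod.snd).map (fun vs =>
          if PySem.List.len vs < ((m.toNat : Nat) : Int) then
            vs ++ List.replicate (((m.toNat : Nat) : Int) - PySem.List.len vs).toNat (PySem.List.pyGetD vs (-1) "")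
          else vs), l.length = m.toNat := by
        intro l hl
        simp only [List.map_map, List.mem_map, Function.comp] at hl
        obtain ⟨p, hp, rfl⟩ := hl
        have hle : (p.2.length : Int) ≤ ((m.toNat : Nat) : Int) := by rw [← hmn]; exact hmax p hp
        simp only [PySem.List.len_eq]
        by_cases hc : ((p.2.length : Nat) : Int) < ((m.toNat : Nat) : Int)
        · rw [if_pos hc]
          simp only [List.length_append, List.length_replicate]
          omega
        · rw [if_neg hc]
          omega
      have hpadne : (pm.map Prod.snd).map (fun vs =>
          if PySem.List.len vs < ((m.toNat : Nat) : Int) then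
            vs ++ List.replicate (((m.toNat : Nat) : Int) - PySem.List.len vs).toNat (PySem.List.pyGetD vs (-1) "")
          else vs) ≠ [] := by simpa using hpm
      rw [zipStar_eq m.toNat _ hpadne hlens]
      simp only [List.map_map, Function.comp, List.zip_map', Prod.mk.eta, List.map_id]
      apply List.map_congr_left
      intro k hk
      have hkn : k < m.toNat := List.mem_range.mp hk
      congr 1
      apply congrArg
      beta_reduce
      rw [List.zip_map']
      simp only [Function.comp_id, Function.comp]
      apply List.map_congr_left
      intro p hp
      refine Prod.ext rfl ?_
      exact padded_getD p.2 (hpre p hp) m.toNat k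
        (by have := hmax p hp; omega) hkn
    · -- every value list is empty: both sides are []
      have hmz : m = 0 := by
        rw [hqm]
        have := hpre q hq
        simp [this]
      rw [hmz]
      have h1 : PySem.List.pyRange 0 (0 : Int) = [] := by decide
      rw [h1]
      simp only [List.foldl_nil]
      have hlens : ∀ l ∈ (pm.map Prod.snd).map (fun vs =>
          if PySem.List.len vs < (0 : Int) then
            vs ++ List.replicate ((0 : Int) - PySem.List.len vs).toNat (PySem.List.pyGetD vs (-1) "")
          else vs), l.length = 0 := by
        intro l hl
        simp only [List.map_map, List.mem_map, Function.comp] at hl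
        obtain ⟨p, hp, rfl⟩ := hl
        rw [if_neg (by simp [PySem.List.len_eq])]
        simp [hpre p hp]
      have hpadne : (pm.map Prod.snd).map (fun vs =>
          if PySem.List.len vs < (0 : Int) then
            vs ++ List.replicate ((0 : Int) - PySem.List.len vs).toNat (PySem.List.pyGetD vs (-1) "")
          else vs) ≠ [] := by simpa using hpm
      rw [zipStar_eq 0 _ hpadne hlens]
      simp
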